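-- pv_equiv track=rewrite | github.com/SystemLight/py-kit | py_kit/misc.py | omit
-- ===== SOURCE A (Python) =====
-- import copy
--
-- def omit(obj, fields):
--     new_obj = copy.copy(obj)
--     for key in fields:
--         try:
--             del new_obj[key]
--         except KeyError:
--             continue
--     return new_obj
-- ===== SOURCE B (Python) =====
-- def omit(obj, fields):
--     drop = set(fields)
--     result = {}
--     for k, v in obj.items():
--         if k not in drop:
--             result[k] = v
--     return result
-- ===== Notes on version B (the rewrite author's own statement) =====
-- stated objective: alternative
-- what changed: B first builds a hash set of the fields to drop and then makes one pass over obj's items, appending kept entries to a fresh dict, instead of copying obj and deleting each field under try/except.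
import Mathlib
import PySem

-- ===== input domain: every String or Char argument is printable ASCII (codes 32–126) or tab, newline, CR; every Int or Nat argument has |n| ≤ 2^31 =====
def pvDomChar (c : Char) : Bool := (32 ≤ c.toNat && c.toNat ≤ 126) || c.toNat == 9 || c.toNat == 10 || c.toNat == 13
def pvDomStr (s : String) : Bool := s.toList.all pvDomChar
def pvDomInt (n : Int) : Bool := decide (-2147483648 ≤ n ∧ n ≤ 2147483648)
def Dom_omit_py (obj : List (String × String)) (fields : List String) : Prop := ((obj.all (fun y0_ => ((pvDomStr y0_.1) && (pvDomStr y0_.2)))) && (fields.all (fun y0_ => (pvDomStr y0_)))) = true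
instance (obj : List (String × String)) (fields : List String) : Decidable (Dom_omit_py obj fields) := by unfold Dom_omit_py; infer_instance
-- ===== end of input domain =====

-- B builds a set of the fields once and rebuilds a fresh dict in one pass over obj's items, instead of copying obj and deleting each field under try/except (return-value equivalence; no speed claim).

-- ===== PORT A =====
-- new_obj = copy.copy(obj); for key in fields: del new_obj[key] (KeyError caught → continue); return new_obj
-- 'del' on a present key removes it, on a missing key the exception is swallowed: both are Dict.erase (a no-op on a missing key).
def omit_py (obj : List (String × String)) (fields : List String) : List (String × String) :=
  (fields.foldl (fun d key => d.erase key) (PySem.Dict.ofList obj)).items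

-- ===== PORT B =====
-- drop = set(fields); result = {}; for k, v in obj.items(): if k not in drop: result[k] = v; return result
def omit_py_alt (obj : List (String × String)) (fields : List String) : List (String × String) :=
  let drop : PySem.Set String := PySem.Set.ofList fields
  ((PySem.Dict.ofList obj).items.foldl
      (fun (result : PySem.Dict String String) kv =>
        if !(PySem.Set.contains drop kv.1) then result.insert kv.1 kv.2 else result)
      PySem.Dict.empty).items

-- ===== PRECONDITION & SPEC =====
def Spec_omit_py (obj : List (String × String)) (fields : List String) (out : List (String × String)) : Prop := out = omit_py_alt obj fields
instance (obj : List (String × String)) (fields : List String) (out : List (String × String)) : Decidable (Spec_omit_py obj fields out) := by unfold Spec_omit_py; infer_instance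

-- ===== CLAIM =====
def Claim_equal_omit_py : Prop := ∀ (obj : List (String × String)) (fields : List String), Dom_omit_py obj fields → Spec_omit_py obj fields (omit_py obj fields)

-- ===== LEMMAS AND PROOFS =====

theorem items_erase (d : PySem.Dict String String) (k : String) :
    (d.erase k).items = d.items.filter (fun p => !(p.1 == k)) := by
  unfold PySem.Dict.erase; rfl

-- A's delete loop is a filter of the items by "key not among fields".
theorem foldl_erase_items (fields : List String) (d : PySem.Dict String String) :
    (fields.foldl (fun d key => d.erase key) d).items
      = d.items.filter (fun kv => !(fields.contains kv.1)) := by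
  induction fields generalizing d with
  | nil => simp
  | cons k ks ih =>
      simp only [List.foldl_cons, ih, items_erase, List.filter_filter]
      apply List.filter_congr
      intro p _
      simp only [List.contains_cons, Bool.not_or, Bool.and_comm]

-- B's rebuild loop, over pairs with distinct keys fresh to the accumulator, appends exactly the kept pairs.
theorem foldl_insert_filter (p : String → Bool) (xs : List (String × String))
    (d : PySem.Dict String String)
    (hnd : (xs.map (·.1)).Nodup)
    (hfresh : ∀ q ∈ xs, d.contains q.1 = false) :
    (xs.foldl (fun r kv => if !(p kv.1) then r.insert kv.1 kv.2 else r) d).items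
      = d.items ++ xs.filter (fun kv => !(p kv.1)) := by
  induction xs generalizing d with
  | nil => simp
  | cons q rest ih =>
      simp only [List.map_cons, List.nodup_cons, List.mem_map] at hnd
      by_cases hp : p q.1 = true
      · simp only [List.foldl_cons, hp, Bool.not_true, Bool.false_eq_true, if_false]
        rw [ih d hnd.2 (fun r hr => hfresh r (List.mem_cons_of_mem _ hr))]
        simp [hp]
      · replace hp : p q.1 = false := by revert hp; cases p q.1 <;> simp
        simp only [List.foldl_cons, hp, Bool.not_false, if_true]
        rw [ih (d.insert q.1 q.2) hnd.2 ?_]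
        · rw [PySem.Dict.items_insert_of_not_contains _ _ (hfresh q (List.mem_cons_self ..))]
          simp [hp]
        · intro r hr
          rw [PySem.Dict.contains_insert]
          have hne : ¬ (r.1 == q.1) = true := by
            simp only [beq_iff_eq]
            intro he
            exact hnd.1 ⟨r, hr, he⟩
          simp only [hfresh r (List.mem_cons_of_mem _ hr), Bool.or_false]
          revert hne; cases r.1 == q.1 <;> simp

-- set(fields) has the same members as fields.
theorem contains_ofList_eq (fields : List String) (k : String) :
    PySem.Set.contains (PySem.Set.ofList fields) k = fields.contains k := by
  simp only [PySem.Set.contains_eq_listContains]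
  by_cases h : k ∈ fields
  · simp [h, (PySem.Set.mem_ofList _ _).2 h]
  · simp [h]

-- ===== VERDICT =====
theorem omit_py_spec : Claim_equal_omit_py := by
  intro obj fields _
  unfold Spec_omit_py omit_py omit_py_alt
  rw [foldl_erase_items,
      foldl_insert_filter (fun k => PySem.Set.contains (PySem.Set.ofList fields) k)
        (PySem.Dict.ofList obj).items PySem.Dict.empty
        ?_ (fun q _ => by simp [PySem.Dict.contains_empty])]
  · simp only [PySem.Dict.empty, List.nil_append]
    apply List.filter_congr
    intro q _
    rw [contains_ofList_eq]
  · have := PySem.Dict.nodup_keys_ofList (κ := String) (ν := String) obj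
    simpa [PySem.Dict.keys] using this
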